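-- pv_equiv track=rewrite | github.com/kakaocloud-school-study/codetree | Park/Baekjoon/어두운 굴다리.py | find_min_height
-- ===== SOURCE A (Python) =====
-- def is_possible(height, positions, N):
--     # 첫 번째 가로등이 커버할 수 있는 범위
--     if positions[0] - height > 0:
--         return False
--
--     # 각 가로등이 커버할 수 있는 범위를 확인
--     for i in range(1, len(positions)):
--         if positions[i-1] + height < positions[i] - height:
--             return False
--
--     # 마지막 가로등이 커버할 수 있는 범위
--     if positions[-1] + height < N:
--         return False
--
--     return True
--
-- def find_min_height(N, M, positions):
--     left, right = 1, N
--     result = N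
--
--     while left <= right:
--         mid = (left + right) // 2
--         if is_possible(mid, positions, N):
--             result = mid
--             right = mid - 1
--         else:
--             left = mid + 1
--
--     return result
-- ===== SOURCE B (Python) =====
-- def find_min_height(N, M, positions):
--     req = positions[0]
--     for a, b in zip(positions, positions[1:]):
--         req = max(req, (b - a + 1) // 2)
--     req = max(req, N - positions[-1])
--     return min(max(req, 1), N)
-- ===== Notes on version B (the rewrite author's own statement) =====
-- stated objective: faster
-- what changed: Replaces A's binary search over heights 1..N (each probe rescanning all positions) by a single pass that takes the maximum of the per-gap lower bounds positions[0], ceil(gap/2) and N-positions[-1], clamped to [1, N].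
-- outside the precondition, e.g. on find_min_height(0, 0, []): A returns 0, B raises IndexError; on find_min_height(3, 1, []): A raises IndexError, B raises IndexError
import Mathlib
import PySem

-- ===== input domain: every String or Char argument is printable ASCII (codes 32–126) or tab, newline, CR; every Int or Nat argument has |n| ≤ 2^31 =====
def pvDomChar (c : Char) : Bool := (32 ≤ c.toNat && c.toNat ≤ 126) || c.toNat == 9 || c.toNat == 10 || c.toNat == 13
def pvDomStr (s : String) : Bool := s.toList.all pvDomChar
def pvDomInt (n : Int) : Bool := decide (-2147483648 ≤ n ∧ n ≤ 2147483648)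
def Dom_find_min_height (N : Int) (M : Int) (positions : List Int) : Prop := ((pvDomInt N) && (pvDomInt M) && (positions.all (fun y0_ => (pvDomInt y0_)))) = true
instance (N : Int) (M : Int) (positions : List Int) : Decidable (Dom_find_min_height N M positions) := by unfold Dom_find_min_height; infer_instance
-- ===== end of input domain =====

-- B replaces A's binary search over [1, N] (re-scanning all positions per probe) by a single
-- pass computing the largest per-gap lower bound directly; objective: faster (O(M) vs O(M log N)).

-- ===== PORT A =====
-- positions[0] / positions[-1] raise IndexError on []; Pre_ excludes [], so the getD default is never used.
def is_possible (height : Int) (positions : List Int) (N : Int) : Bool :=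
  if PySem.List.pyGetD positions 0 0 - height > 0 then false
  else if !((PySem.List.pyRange 1 (positions.length : Int) 1).all fun i =>
      !(PySem.List.pyGetD positions (i - 1) 0 + height < PySem.List.pyGetD positions i 0 - height)) then false
  else if PySem.List.pyGetD positions (-1) 0 + height < N then false
  else true

def fmh_loop (positions : List Int) (N : Int) (left right result : Int) : Int :=
  if h : left ≤ right then
    let mid := PySem.Int.floordiv (left + right) 2
    if is_possible mid positions N then fmh_loop positions N left (mid - 1) mid
    else fmh_loop positions N (mid + 1) right result
  else result
termination_by (right - left + 1).toNat
decreasing_by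
  · have := PySem.Int.floordiv_two_mid_bounds h; omega
  · have := PySem.Int.floordiv_two_mid_bounds h; omega

def find_min_height (N : Int) (M : Int) (positions : List Int) : Int :=
  fmh_loop positions N 1 N N

-- ===== PORT B =====
def find_min_height_alt (N : Int) (M : Int) (positions : List Int) : Int :=
  let req0 := PySem.List.pyGetD positions 0 0
  let req1 := (positions.zip (PySem.List.slice positions (some 1) none)).foldl
      (fun acc ab => max acc (PySem.Int.floordiv (ab.2 - ab.1 + 1) 2)) req0
  let req2 := max req1 (N - PySem.List.pyGetD positions (-1) 0)
  min (max req2 1) N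

-- ===== PRECONDITION & SPEC =====
-- Pre_ excludes only the empty position list: there A raises IndexError when N >= 1 and, when N < 1,
-- returns N without ever inspecting the list (the search loop never runs), while B always raises IndexError.
def Pre_find_min_height (N : Int) (M : Int) (positions : List Int) : Prop := positions ≠ []
instance (N : Int) (M : Int) (positions : List Int) : Decidable (Pre_find_min_height N M positions) := by unfold Pre_find_min_height; infer_instance
def pvWitness_find_min_height : Int × Int × List Int := (7, 2, [2, 5])

def Spec_find_min_height (N : Int) (M : Int) (positions : List Int) (out : Int) : Prop := out = find_min_height_alt N M positions
instance (N : Int) (M : Int) (positions : List Int) (out : Int) : Decidable (Spec_find_min_height N M positions out) := by unfold Spec_find_min_height; infer_instance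

-- ===== CLAIM (what is proved, stated in full; the proofs are below) =====
def Claim_equal_find_min_height : Prop := ∀ (N : Int) (M : Int) (positions : List Int), Dom_find_min_height N M positions → Pre_find_min_height N M positions → Spec_find_min_height N M positions (find_min_height N M positions)

-- ===== LEMMAS AND PROOFS =====

-- the lower bound B computes in one pass
def fmhReq (N : Int) (positions : List Int) : Int :=
  max ((positions.zip positions.tail).foldl
      (fun acc ab => max acc (PySem.Int.floordiv (ab.2 - ab.1 + 1) 2))
      (PySem.List.pyGetD positions 0 0))
    (N - PySem.List.pyGetD positions (-1) 0)

theorem alt_eq (N M : Int) (positions : List Int) :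
    find_min_height_alt N M positions = min (max (fmhReq N positions) 1) N := by
  simp [find_min_height_alt, fmhReq, PySem.List.slice_from_one]

theorem foldl_max_le (f : Int × Int → Int) (h : Int) :
    ∀ (l : List (Int × Int)) (b : Int),
      (l.foldl (fun acc ab => max acc (f ab)) b ≤ h ↔ b ≤ h ∧ ∀ ab ∈ l, f ab ≤ h) := by
  intro l
  induction l with
  | nil => simp
  | cons x xs ih =>
    intro b
    simp only [List.foldl_cons, ih, List.mem_cons]
    constructor
    · rintro ⟨hb, hall⟩
      exact ⟨by omega, fun ab hab => by rcases hab with rfl | hab; omega; exact hall ab hab⟩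
    · rintro ⟨hb, hall⟩
      exact ⟨by have := hall x (Or.inl rfl); omega, fun ab hab => hall ab (Or.inr hab)⟩

theorem zip_tail_le (p : List Int) (h : Int) :
    (∀ ab ∈ p.zip p.tail, PySem.Int.floordiv (ab.2 - ab.1 + 1) 2 ≤ h) ↔
      (∀ j : Nat, (hj : j + 1 < p.length) → p[j + 1] - p[j] ≤ 2 * h) := by
  constructor
  · intro hall j hj
    have hmem : (p[j], p[j + 1]) ∈ p.zip p.tail := by
      have hlen : j < (p.zip p.tail).length := by
        simp [List.length_zip, List.length_tail]; omega
      have : (p.zip p.tail)[j] = (p[j], p[j + 1]) := by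
        simp [List.getElem_zip, List.getElem_tail]
      exact this ▸ List.getElem_mem hlen
    have := hall _ hmem
    rw [PySem.Int.floordiv_eq_ediv_of_pos (by omega)] at this
    omega
  · intro hall ab hab
    rcases List.mem_iff_getElem.mp hab with ⟨j, hj, hget⟩
    have hjlen : j + 1 < p.length := by
      simp [List.length_zip, List.length_tail] at hj; omega
    have : ab = (p[j], p[j + 1]) := by
      rw [← hget]; simp [List.getElem_zip, List.getElem_tail]
    subst this
    have := hall j hjlen
    rw [PySem.Int.floordiv_eq_ediv_of_pos (by omega)]
    simp only
    omega

theorem range_all_iff (p : List Int) (h : Int) :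
    (((PySem.List.pyRange 1 (p.length : Int) 1).all fun i =>
        !(PySem.List.pyGetD p (i - 1) 0 + h < PySem.List.pyGetD p i 0 - h)) = true) ↔
      (∀ j : Nat, (hj : j + 1 < p.length) → p[j + 1] - p[j] ≤ 2 * h) := by
  rw [List.all_eq_true]
  constructor
  · intro hall j hj
    have hmem : ((j : Int) + 1) ∈ PySem.List.pyRange 1 (p.length : Int) 1 := by
      rw [PySem.List.mem_pyRange_one]; omega
    have hthis := hall _ hmem
    rw [show ((j : Int) + 1 - 1) = ((j : Nat) : Int) by omega,
        show ((j : Int) + 1) = ((j + 1 : Nat) : Int) by push_cast; omega] at hthis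
    simp only [PySem.List.pyGetD_natCast] at hthis
    rw [List.getD_eq_getElem _ _ (by omega), List.getD_eq_getElem _ _ hj] at hthis
    simp at hthis
    omega
  · intro hall i hi
    rw [PySem.List.mem_pyRange_one] at hi
    obtain ⟨j, rfl⟩ : ∃ j : Nat, i = (j : Int) + 1 := ⟨(i - 1).toNat, by omega⟩
    have hj : j + 1 < p.length := by omega
    have hthis := hall j hj
    rw [show ((j : Int) + 1 - 1) = ((j : Nat) : Int) by omega,
        show ((j : Int) + 1) = ((j + 1 : Nat) : Int) by push_cast; omega]
    simp only [PySem.List.pyGetD_natCast]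
    rw [List.getD_eq_getElem _ _ (by omega), List.getD_eq_getElem _ _ hj]
    simp
    omega

theorem is_possible_iff (h N : Int) (p : List Int) :
    (is_possible h p N = true) ↔ fmhReq N p ≤ h := by
  have hmid := range_all_iff p h
  unfold is_possible fmhReq
  rw [max_le_iff, foldl_max_le, zip_tail_le]
  split_ifs with h1 h2 h3
  · exact ⟨fun hc => by simp at hc, fun ⟨⟨hp0, _⟩, _⟩ => absurd h1 (by omega)⟩
  · refine ⟨fun hc => by simp at hc, fun ⟨⟨_, hm⟩, _⟩ => ?_⟩
    have : _ = true := hmid.mpr hm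
    simp [this] at h2
  · exact ⟨fun hc => by simp at hc, fun ⟨_, hlast⟩ => absurd h3 (by omega)⟩
  · simp only [Bool.not_eq_true] at h2
    refine ⟨fun _ => ⟨⟨by omega, hmid.mp (by simpa using h2)⟩, by omega⟩, fun _ => rfl⟩

theorem loop_eq (p : List Int) (N R : Int)
    (hiff : ∀ h : Int, (is_possible h p N = true) ↔ R ≤ h) :
    ∀ (n : Nat) (l r res : Int), (r - l + 1).toNat ≤ n →
      fmh_loop p N l r res = if l ≤ r then (if R ≤ r then max l R else res) else res := by
  intro n
  induction n with
  | zero =>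
    intro l r res hn
    rw [fmh_loop]
    rw [dif_neg (by omega), if_neg (by omega)]
  | succ n ih =>
    intro l r res hn
    rw [fmh_loop]
    by_cases hlr : l ≤ r
    · rw [dif_pos hlr]
      have hmid := PySem.Int.floordiv_two_mid_bounds hlr
      set mid := PySem.Int.floordiv (l + r) 2 with hmiddef
      by_cases hp : is_possible mid p N = true
      · rw [if_pos hp]
        have hR : R ≤ mid := (hiff mid).mp hp
        rw [ih l (mid - 1) mid (by omega)]
        split_ifs <;> omega
      · rw [if_neg hp]
        have hR : ¬ R ≤ mid := fun hc => hp ((hiff mid).mpr hc)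
        rw [ih (mid + 1) r res (by omega)]
        split_ifs <;> omega
    · rw [dif_neg hlr, if_neg hlr]

-- ===== VERDICT (by name: the statement is the Claim_ definition above) =====
theorem find_min_height_spec : Claim_equal_find_min_height := by
  intro N M positions _hdom hpre
  unfold Spec_find_min_height
  rw [alt_eq]
  unfold find_min_height
  rw [loop_eq positions N (fmhReq N positions)
      (fun h => is_possible_iff h N positions)
      (N - 1 + 1).toNat 1 N N (by omega)]
  split_ifs <;> omega
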